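-- pv_equiv track=rewrite | github.com/gav-sturm/Nellie_MitoGraph | TopologicalGraph.py | get_neighbors_3d
-- ===== SOURCE A (Python) =====
-- def get_neighbors_3d(coord, shape):
--     z, y, x = coord
--     neighbors = []
--     for dz in [-1, 0, 1]:
--         for dy in [-1, 0, 1]:
--             for dx in [-1, 0, 1]:
--                 if dz == 0 and dy == 0 and dx == 0:
--                     continue
--                 nz = z + dz
--                 ny = y + dy
--                 nx = x + dx
--                 if 0 <= nz < shape[0] and 0 <= ny < shape[1] and 0 <= nx < shape[2]:
--                     neighbors.append((nz, ny, nx))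
--     return neighbors
-- ===== SOURCE B (Python) =====
-- def get_neighbors_3d(coord, shape):
--     # Generic n-D decomposition: per-axis in-bounds candidates, a recursive
--     # cartesian product over the axis list, then drop the center cell.
--     def axis(c, s):
--         return [v for v in (c - 1, c, c + 1) if 0 <= v < s]
--
--     def product(axes):
--         if not axes:
--             return [()]
--         rest = product(axes[1:])
--         return [(v,) + t for v in axes[0] for t in rest]
--
--     cells = product([axis(coord[i], shape[i]) for i in range(3)])
--     return [t for t in cells if t != coord]
-- ===== Notes on version B (the rewrite author's own statement) =====
-- stated objective: alternative
-- what changed: B replaces A's triple nested offset loop with bound checks by a generic n-dimensional decomposition: per-axis in-bounds candidate lists, a recursive cartesian product over the list of axes, and a final pass that drops the center cell.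
import Mathlib
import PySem

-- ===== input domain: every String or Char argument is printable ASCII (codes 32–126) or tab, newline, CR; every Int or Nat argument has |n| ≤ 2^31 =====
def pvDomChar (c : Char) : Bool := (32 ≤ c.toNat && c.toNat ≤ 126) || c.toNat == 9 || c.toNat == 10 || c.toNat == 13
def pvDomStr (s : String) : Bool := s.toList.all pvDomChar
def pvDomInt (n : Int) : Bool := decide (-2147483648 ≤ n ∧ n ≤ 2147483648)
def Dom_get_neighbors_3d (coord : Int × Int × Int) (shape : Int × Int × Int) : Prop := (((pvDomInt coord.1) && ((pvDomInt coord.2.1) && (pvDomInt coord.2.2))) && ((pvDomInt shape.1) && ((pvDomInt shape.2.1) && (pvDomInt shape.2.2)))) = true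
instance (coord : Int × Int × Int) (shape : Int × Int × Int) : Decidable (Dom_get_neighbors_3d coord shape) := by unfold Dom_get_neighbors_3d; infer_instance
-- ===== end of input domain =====

-- B: per-axis in-bounds candidate lists + a recursive cartesian product over the axis list,
-- then the center cell is dropped in a final pass (objective: alternative decomposition).

-- ===== PORT A =====
def get_neighbors_3d (coord : Int × Int × Int) (shape : Int × Int × Int) : List (Int × Int × Int) :=
  let z := coord.1; let y := coord.2.1; let x := coord.2.2
  ([-1, 0, 1] : List Int).foldl (fun acc dz =>
    ([-1, 0, 1] : List Int).foldl (fun acc dy =>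
      ([-1, 0, 1] : List Int).foldl (fun acc dx =>
        if dz = 0 ∧ dy = 0 ∧ dx = 0 then acc
        else
          let nz := z + dz; let ny := y + dy; let nx := x + dx
          if 0 ≤ nz ∧ nz < shape.1 ∧ 0 ≤ ny ∧ ny < shape.2.1 ∧ 0 ≤ nx ∧ nx < shape.2.2 then
            acc ++ [(nz, ny, nx)]
          else acc) acc) acc) []

-- ===== PORT B =====
-- axis(c, s): the in-bounds candidates c-1, c, c+1 on one axis
def pvAxis (c s : Int) : List Int :=
  ([c - 1, c, c + 1] : List Int).filter (fun v => decide (0 ≤ v ∧ v < s))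

-- product(axes): Python's variable-arity int tuples are represented as List Int
def pvProduct (axes : List (List Int)) : List (List Int) :=
  match axes with
  | [] => [[]]
  | a :: rest => a.flatMap (fun v => (pvProduct rest).map (fun t => v :: t))

def get_neighbors_3d_alt (coord : Int × Int × Int) (shape : Int × Int × Int) : List (Int × Int × Int) :=
  let cells := pvProduct [pvAxis coord.1 shape.1, pvAxis coord.2.1 shape.2.1, pvAxis coord.2.2 shape.2.2]
  -- [t for t in cells if t != coord], re-packing the 3-element lists as triples
  cells.filterMap (fun t =>
    match t with
    | [a, b, c] => if (a, b, c) = coord then none else some (a, b, c)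
    | _ => none)

-- ===== PRECONDITION & SPEC =====
def Spec_get_neighbors_3d (coord : Int × Int × Int) (shape : Int × Int × Int) (out : List (Int × Int × Int)) : Prop := out = get_neighbors_3d_alt coord shape
instance (coord : Int × Int × Int) (shape : Int × Int × Int) (out : List (Int × Int × Int)) : Decidable (Spec_get_neighbors_3d coord shape out) := by unfold Spec_get_neighbors_3d; infer_instance

-- ===== CLAIM (what is proved, stated in full; the proofs are below) =====
def Claim_equal_get_neighbors_3d : Prop := ∀ (coord : Int × Int × Int) (shape : Int × Int × Int), Dom_get_neighbors_3d coord shape → Spec_get_neighbors_3d coord shape (get_neighbors_3d coord shape)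

-- ===== LEMMAS AND PROOFS =====

-- `continue` shape: the two nested ifs of A's loop body collapse to one guarded append
theorem pv_if_continue {α : Type} {c d : Prop} [Decidable c] [Decidable d] (acc : List α) (t : α) :
    (if c then acc else if d then acc ++ [t] else acc) = (if ¬c ∧ d then acc ++ [t] else acc) := by
  split_ifs <;> tauto

-- pvAxis as a filtered-and-shifted offset list
theorem pv_axis_eq (c s : Int) :
    pvAxis c s = (([-1, 0, 1] : List Int).filter (fun d => decide (0 ≤ c + d ∧ c + d < s))).map (fun d => c + d) := by
  rw [pvAxis, show ([c - 1, c, c + 1] : List Int) = ([-1, 0, 1] : List Int).map (fun d => c + d) from by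
    simp [List.map, sub_eq_add_neg], List.filter_map]
  rfl

theorem pv_fm_single {α β : Type} (f : α → Option β) (a : α) :
    List.filterMap f [a] = (f a).toList := by
  cases h : f a <;> simp [h]

theorem pv_fm_as_flatMap {α β : Type} (f : α → Option β) (l : List α) :
    l.flatMap (fun a => (f a).toList) = l.filterMap f := by
  induction l with
  | nil => rfl
  | cons a l ih => cases h : f a <;> simp [h, ih]

theorem pv_map_filter {α β : Type} (l : List α) (p : α → Bool) (f : α → β) :
    (l.filter p).map f = l.filterMap (fun a => if p a then some (f a) else none) := by
  induction l with
  | nil => rfl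
  | cons a l ih =>
    simp only [List.filter_cons]
    by_cases h : p a = true <;> simp [h, ih]

theorem pv_filterMap_filter {α β : Type} (l : List α) (p : α → Bool) (f : α → Option β) :
    (l.filter p).filterMap f = l.filterMap (fun a => if p a then f a else none) := by
  induction l with
  | nil => rfl
  | cons a l ih =>
    simp only [List.filter_cons]
    by_cases h : p a = true
    · simp only [h, if_true, List.filterMap_cons, ih]
    · simp [h, ih]

theorem pv_flatMap_filter {α β : Type} (l : List α) (p : α → Bool) (f : α → List β) :
    (l.filter p).flatMap f = l.flatMap (fun a => if p a then f a else []) := by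
  induction l with
  | nil => rfl
  | cons a l ih =>
    simp only [List.filter_cons, List.flatMap_cons]
    by_cases h : p a = true <;> simp [h, ih]

theorem pv_if_flatMap {α β : Type} {c : Prop} [Decidable c] (l : List α) (f : α → List β) :
    (if c then l.flatMap f else []) = l.flatMap (fun a => if c then f a else []) := by
  split_ifs with h <;> simp

theorem pv_if_filterMap {α β : Type} {c : Prop} [Decidable c] (l : List α) (f : α → Option β) :
    (if c then l.filterMap f else []) = l.filterMap (fun a => if c then f a else none) := by
  split_ifs with h <;> simp

-- B in nested-flatMap normal form
theorem pv_alt_normal (z y x s0 s1 s2 : Int) :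
    get_neighbors_3d_alt (z, y, x) (s0, s1, s2)
      = (pvAxis z s0).flatMap (fun a => (pvAxis y s1).flatMap (fun b =>
          (pvAxis x s2).filterMap (fun c => if (a, b, c) = ((z, y, x) : Int × Int × Int) then none else some (a, b, c)))) := by
  unfold get_neighbors_3d_alt
  simp only [pvProduct, List.filterMap_flatMap, List.filterMap_map, Function.comp_def,
    pv_fm_single, pv_fm_as_flatMap]

-- ===== VERDICT (by name: the statement is the Claim_ definition above) =====
theorem get_neighbors_3d_spec : Claim_equal_get_neighbors_3d := by
  intro coord shape _
  obtain ⟨z, y, x⟩ := coord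
  obtain ⟨s0, s1, s2⟩ := shape
  unfold Spec_get_neighbors_3d
  rw [pv_alt_normal]
  -- normalize B to nested flatMap/filterMap over the offset list [-1,0,1]
  simp only [pv_axis_eq, List.flatMap_map, List.filterMap_map, pv_flatMap_filter,
    pv_filterMap_filter, pv_if_flatMap, pv_if_filterMap, Function.comp_def]
  -- normalize A to the same shape
  unfold get_neighbors_3d
  simp only [pv_if_continue, PySem.List.foldl_append_ite, PySem.List.foldl_append_eq_flatMap,
    List.nil_append, pv_map_filter]
  congr 1; funext dz
  congr 1; funext dy
  refine List.filterMap_congr ?_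
  intro dx _
  simp only [decide_eq_true_eq, Prod.mk.injEq]
  split_ifs <;> first | rfl | (exfalso; omega)
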